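-- pv_equiv track=rewrite | github.com/sby854905420-netizen/Multi-TableQA | Data/Financial/financial_test.py | classify_sql_type
-- ===== SOURCE A (Python) =====
-- def classify_sql_type(sql: str) -> str:
--     sql = sql.lower()
--     if "count(" in sql:
--         return "Count"
--     elif "group by" in sql or "distinct" in sql:
--         return "List"
--     elif any(agg in sql for agg in ["avg(", "sum(", "max(", "min("]):
--         return "Numerical"
--     elif "select" in sql:
--         return "Select"
--     else:
--         return "Other"
-- ===== SOURCE B (Python) =====
-- def classify_sql_type(sql: str) -> str:
--     s = sql.lower()
--     # One pass over positions: at each index test which keywords start there,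
--     # accumulating a found-flag per category; decide by priority at the end.
--     c = gl = num = sel = False
--     for i in range(len(s)):
--         c = c or s.startswith("count(", i)
--         gl = gl or s.startswith("group by", i) or s.startswith("distinct", i)
--         num = (num or s.startswith("avg(", i) or s.startswith("sum(", i)
--                or s.startswith("max(", i) or s.startswith("min(", i))
--         sel = sel or s.startswith("select", i)
--     if c:
--         return "Count"
--     if gl:
--         return "List"
--     if num:
--         return "Numerical"
--     if sel:
--         return "Select"
--     return "Other"
-- ===== Notes on version B (the rewrite author's own statement) =====
-- stated objective: alternative
-- what changed: Instead of A's five independent whole-string substring-membership searches tried branch by branch, B makes a single left-to-right pass over the positions of the lowercased string, accumulating one found-flag per category via startswith at each index, and decides the label from the flags by priority at the end.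
import Mathlib
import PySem

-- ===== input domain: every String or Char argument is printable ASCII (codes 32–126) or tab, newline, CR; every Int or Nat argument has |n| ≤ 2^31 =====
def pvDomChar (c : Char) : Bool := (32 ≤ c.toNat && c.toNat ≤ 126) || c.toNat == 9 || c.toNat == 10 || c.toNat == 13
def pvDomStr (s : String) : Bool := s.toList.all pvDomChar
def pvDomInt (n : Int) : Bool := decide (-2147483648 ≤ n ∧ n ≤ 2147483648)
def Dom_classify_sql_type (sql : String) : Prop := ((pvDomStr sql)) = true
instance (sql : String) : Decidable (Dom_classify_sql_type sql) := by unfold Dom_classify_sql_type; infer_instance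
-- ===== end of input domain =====

-- B replaces A's five separate substring searches by a single left-to-right positional
-- scan accumulating one found-flag per category (objective: alternative, same cost).

-- ===== PORT A =====
def classify_sql_type (sql : String) : String :=
  let s := PySem.Str.lower sql
  if PySem.Str.isIn "count(" s then "Count"
  else if PySem.Str.isIn "group by" s || PySem.Str.isIn "distinct" s then "List"
  else if (["avg(", "sum(", "max(", "min("] : List String).any (fun agg => PySem.Str.isIn agg s) then "Numerical"
  else if PySem.Str.isIn "select" s then "Select"
  else "Other"

-- ===== PORT B =====
-- s.startswith(kw, i) for 0 ≤ i ≤ len(s) is kw.isPrefixOf (s.drop i); the loop over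
-- i ∈ range(len(s)) is the structural recursion over the (nonempty) suffixes of s.
def sqlScanFlags : List Char → (Bool × Bool × Bool × Bool) → (Bool × Bool × Bool × Bool)
  | [], f => f
  | l@(_ :: rest), (c, gl, num, sel) =>
      sqlScanFlags rest
        (c || ("count(".toList.isPrefixOf l),
         gl || ("group by".toList.isPrefixOf l) || ("distinct".toList.isPrefixOf l),
         num || ("avg(".toList.isPrefixOf l) || ("sum(".toList.isPrefixOf l)
             || ("max(".toList.isPrefixOf l) || ("min(".toList.isPrefixOf l),
         sel || ("select".toList.isPrefixOf l))

def classify_sql_type_alt (sql : String) : String :=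
  let f := sqlScanFlags (PySem.Str.lower sql).toList (false, false, false, false)
  if f.1 then "Count"
  else if f.2.1 then "List"
  else if f.2.2.1 then "Numerical"
  else if f.2.2.2 then "Select"
  else "Other"

-- ===== PRECONDITION & SPEC =====
def Spec_classify_sql_type (sql : String) (out : String) : Prop := out = classify_sql_type_alt sql
instance (sql : String) (out : String) : Decidable (Spec_classify_sql_type sql out) := by unfold Spec_classify_sql_type; infer_instance

-- ===== CLAIM (what is proved, stated in full; the proofs are below) =====
def Claim_equal_classify_sql_type : Prop := ∀ (sql : String), Dom_classify_sql_type sql → Spec_classify_sql_type sql (classify_sql_type sql)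

-- ===== LEMMAS AND PROOFS =====

-- whether some nonempty suffix of l starts with kw
def sqlFound (kw : List Char) : List Char → Bool
  | [] => false
  | l@(_ :: rest) => kw.isPrefixOf l || sqlFound kw rest

lemma sqlScanFlags_eq (l : List Char) (c gl num sel : Bool) :
    sqlScanFlags l (c, gl, num, sel) =
      (c || sqlFound "count(".toList l,
       gl || sqlFound "group by".toList l || sqlFound "distinct".toList l,
       num || sqlFound "avg(".toList l || sqlFound "sum(".toList l
           || sqlFound "max(".toList l || sqlFound "min(".toList l,
       sel || sqlFound "select".toList l) := by
  induction l generalizing c gl num sel with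
  | nil => simp [sqlScanFlags, sqlFound]
  | cons x rest ih =>
      simp only [sqlScanFlags, ih, sqlFound]
      refine Prod.ext ?_ (Prod.ext ?_ (Prod.ext ?_ ?_)) <;> ac_rfl

lemma sqlFound_eq_isIn (kw : List Char) (hkw : kw ≠ []) (l : List Char) :
    sqlFound kw l = PySem.Chars.isIn kw l := by
  rw [Bool.eq_iff_iff, ← PySem.Chars.exists_prefix_drop_iff_isIn]
  induction l with
  | nil =>
      simp [sqlFound, List.prefix_nil, hkw]
  | cons x rest ih =>
      simp only [sqlFound, Bool.or_eq_true, ih]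
      constructor
      · rintro (h | ⟨j, h⟩)
        · exact ⟨0, by simpa using h⟩
        · exact ⟨j + 1, by simpa using h⟩
      · rintro ⟨j, h⟩
        cases j with
        | zero => exact Or.inl (by simpa using h)
        | succ j => exact Or.inr ⟨j, by simpa using h⟩

-- ===== VERDICT (by name: the statement is the Claim_ definition above) =====
theorem classify_sql_type_spec : Claim_equal_classify_sql_type := by
  intro sql _
  unfold Spec_classify_sql_type classify_sql_type classify_sql_type_alt
  simp only [sqlScanFlags_eq, Bool.false_or,
    sqlFound_eq_isIn "count(".toList (by decide),
    sqlFound_eq_isIn "group by".toList (by decide),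
    sqlFound_eq_isIn "distinct".toList (by decide),
    sqlFound_eq_isIn "avg(".toList (by decide),
    sqlFound_eq_isIn "sum(".toList (by decide),
    sqlFound_eq_isIn "max(".toList (by decide),
    sqlFound_eq_isIn "min(".toList (by decide),
    sqlFound_eq_isIn "select".toList (by decide),
    PySem.Str.isIn_eq, List.any_cons, List.any_nil, Bool.or_false, Bool.or_assoc]
  rfl
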